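-- pv_equiv track=rewrite | github.com/canimiliya/Master-of-Focus | sgp_qt_reading.py | get_literature_stage
-- ===== SOURCE A (Python) =====
-- from typing import Any
--
-- def get_literature_stage(paper_info: dict[str, Any]) -> tuple[str, int]:
--     phases = paper_info.get("phases", []) if isinstance(paper_info.get("phases"), list) else []
--     done_flags = [bool(p.get("done")) for p in phases if isinstance(p, dict)]
--     stage = 0
--     if len(done_flags) >= 1 and done_flags[0]:
--         stage = 1
--     if len(done_flags) >= 2 and done_flags[0] and done_flags[1]:
--         stage = 2
--     if len(done_flags) >= 3 and all(done_flags[:3]):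
--         stage = 2
--
--     label = "泛读"
--     if stage == 1:
--         label = "半精读"
--     elif stage == 2:
--         label = "精读"
--     if done_flags and all(done_flags):
--         label = "精读（完成）"
--     return label, stage
-- ===== SOURCE B (Python) =====
-- from typing import Any
-- from itertools import takewhile
--
-- def get_literature_stage(paper_info: dict[str, Any]) -> tuple[str, int]:
--     phases = paper_info.get("phases", []) if isinstance(paper_info.get("phases"), list) else []
--     done_flags = [bool(p.get("done")) for p in phases if isinstance(p, dict)]
--     leading = sum(1 for _ in takewhile(bool, done_flags))
--     stage = min(leading, 2)
--     label = {0: "泛读", 1: "半精读", 2: "精读"}[stage]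
--     if done_flags and all(done_flags):
--         label = "精读（完成）"
--     return label, stage
-- ===== Notes on version B (the rewrite author's own statement) =====
-- stated objective: simpler
-- what changed: Replaces A's chain of three overlapping indexed guards and the if/elif label chain by counting the leading run of True flags, taking stage = min(leading, 2), and looking the label up in a stage-to-label dict.
import Mathlib
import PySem

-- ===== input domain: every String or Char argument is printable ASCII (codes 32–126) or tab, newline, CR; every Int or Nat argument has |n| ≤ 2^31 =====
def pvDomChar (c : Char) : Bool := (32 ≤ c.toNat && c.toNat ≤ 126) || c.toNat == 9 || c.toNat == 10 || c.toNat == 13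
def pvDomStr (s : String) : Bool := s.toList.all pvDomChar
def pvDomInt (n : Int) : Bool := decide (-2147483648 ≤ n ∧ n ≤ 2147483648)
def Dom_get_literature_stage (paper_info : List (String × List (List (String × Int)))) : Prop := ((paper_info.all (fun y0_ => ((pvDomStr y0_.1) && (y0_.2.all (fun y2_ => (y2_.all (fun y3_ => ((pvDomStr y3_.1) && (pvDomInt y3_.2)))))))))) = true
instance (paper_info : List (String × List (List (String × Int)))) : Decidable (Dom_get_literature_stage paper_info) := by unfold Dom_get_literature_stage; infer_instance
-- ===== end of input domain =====

-- B replaces A's chain of three overlapping indexed guards and the if/elif label chain by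
-- a leading-True-run count with stage = min(leading, 2) and a dict lookup for the label (simpler).

-- ===== PORT A =====
-- literal transliteration of A: the indexed guard chain and the if/elif label chain.
-- (under the type convention every phases value is a list and every element a dict, so the
--  isinstance branches always take the list/dict arm)
def get_literature_stage (paper_info : List (String × List (List (String × Int)))) : String × Int :=
  let phases := ((PySem.Dict.mk paper_info).get? "phases").getD []
  let done_flags := phases.map (fun p => ((PySem.Dict.mk p).getD "done" 0) != 0)
  let stage : Int := 0
  let stage := if 1 ≤ done_flags.length ∧ done_flags.getD 0 false then 1 else stage
  let stage := if 2 ≤ done_flags.length ∧ done_flags.getD 0 false ∧ done_flags.getD 1 false then 2 else stage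
  let stage := if 3 ≤ done_flags.length ∧ (done_flags.take 3).all id then 2 else stage
  let label := "泛读"
  let label := if stage = 1 then "半精读" else if stage = 2 then "精读" else label
  let label := if done_flags ≠ [] ∧ done_flags.all id then "精读（完成）" else label
  (label, stage)

-- ===== PORT B =====
-- literal transliteration of Source B: leading run of True, min with 2, label table.
-- (the Python dict indexing {0:…,1:…,2:…}[stage] never misses since stage ∈ {0,1,2};
--  getD's default "" is unreachable)
def get_literature_stage_alt (paper_info : List (String × List (List (String × Int)))) : String × Int :=
  let phases := ((PySem.Dict.mk paper_info).get? "phases").getD []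
  let done_flags := phases.map (fun p => ((PySem.Dict.mk p).getD "done" 0) != 0)
  let leading := (done_flags.takeWhile id).length
  let stage : Int := min (Int.ofNat leading) 2
  let label := (PySem.Dict.ofList [((0 : Int), "泛读"), (1, "半精读"), (2, "精读")]).getD stage ""
  let label := if done_flags ≠ [] ∧ done_flags.all id then "精读（完成）" else label
  (label, stage)

-- ===== PRECONDITION & SPEC =====
def Spec_get_literature_stage (paper_info : List (String × List (List (String × Int)))) (out : String × Int) : Prop := out = get_literature_stage_alt paper_info
instance (paper_info : List (String × List (List (String × Int)))) (out : String × Int) : Decidable (Spec_get_literature_stage paper_info out) := by unfold Spec_get_literature_stage; infer_instance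

-- ===== CLAIM (what is proved, stated in full; the proofs are below) =====
def Claim_equal_get_literature_stage : Prop := ∀ (paper_info : List (String × List (List (String × Int)))), Dom_get_literature_stage paper_info → Spec_get_literature_stage paper_info (get_literature_stage paper_info)

-- ===== LEMMAS AND PROOFS =====

theorem pv_core_eq (df : List Bool) :
    ((if (if 3 ≤ df.length ∧ (df.take 3).all id then (2 : Int) else
          if 2 ≤ df.length ∧ df.getD 0 false ∧ df.getD 1 false then 2 else
          if 1 ≤ df.length ∧ df.getD 0 false then 1 else 0) = 1 then "半精读" else
       if (if 3 ≤ df.length ∧ (df.take 3).all id then (2 : Int) else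
           if 2 ≤ df.length ∧ df.getD 0 false ∧ df.getD 1 false then 2 else
           if 1 ≤ df.length ∧ df.getD 0 false then 1 else 0) = 2 then "精读" else "泛读"),
      (if 3 ≤ df.length ∧ (df.take 3).all id then (2 : Int) else
       if 2 ≤ df.length ∧ df.getD 0 false ∧ df.getD 1 false then 2 else
       if 1 ≤ df.length ∧ df.getD 0 false then 1 else 0))
    = (((PySem.Dict.ofList [((0 : Int), "泛读"), (1, "半精读"), (2, "精读")]).getD
          (min (Int.ofNat (df.takeWhile id).length) 2) ""),
       min (Int.ofNat (df.takeWhile id).length) 2) := by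
  match df with
  | [] => decide
  | false :: rest => simp [List.takeWhile]; rfl
  | [true] => decide
  | true :: false :: rest => simp [List.takeWhile]; rfl
  | true :: true :: rest =>
      have h2 : min (Int.ofNat (((true :: true :: rest).takeWhile id).length)) 2 = 2 := by
        simp [List.takeWhile]; omega
      rw [h2]
      simp
      rfl

-- ===== VERDICT (by name: the statement is the Claim_ definition above) =====
theorem get_literature_stage_spec : Claim_equal_get_literature_stage := by
  intro pi _
  unfold Spec_get_literature_stage get_literature_stage get_literature_stage_alt
  have h := pv_core_eq
    ((((PySem.Dict.mk pi).get? "phases").getD []).map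
      (fun p => ((PySem.Dict.mk p).getD "done" 0) != 0))
  rw [Prod.mk.injEq] at h
  simp only []
  rw [Prod.mk.injEq]
  exact ⟨by rw [h.1], h.2⟩
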